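-- pv_equiv track=rewrite | github.com/Hulyamr13/hackerrank | Black Hole.py | solveb1p
-- ===== SOURCE A (Python) =====
-- def solveb1p(n, a, p):
--     if a == 0:
--         return (n + 1) % p
--     if a % (p - 1) == 0:
--         return (n - n // p) % p
--     a = a % (p - 1)
--     factlist = [1]
--     for i in range(1, a + 2):
--         factlist.append((factlist[-1] * i) % p)
--     factinvlist = [1] * len(factlist)
--     factinvlist[-1] = pow(factlist[-1], p - 2, p)
--     for i in range(len(factinvlist) - 1, 0, -1):
--         factinvlist[i - 1] = (factinvlist[i] * i) % p
--
--     bernlist = [0] * (a + 1)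
--     bernlist[0] = 1
--     for i in range(1, a + 1):
--         for j in range(i):
--             bernlist[i] -= bernlist[j] * factinvlist[i - j + 1]
--         bernlist[i] = bernlist[i] % p
--     bernlist[1] = p - bernlist[1]
--
--     npow = pow(n, a + 1, p)
--     ninv = pow(n, p - 2, p)
--     toret = 0
--     for i in range(a + 1):
--         toret += bernlist[i] * npow * factinvlist[a + 1 - i]
--         npow = (npow * ninv) % p
--     return (toret * factlist[a]) % p
-- ===== SOURCE B (Python) =====
-- def solveb1p(n, a, p):
--     if a == 0:
--         return (n + 1) % p
--     if a % (p - 1) == 0: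
--         return (n - n // p) % p
--     a %= p - 1
--     # running factorial a! mod p (no list of factorials kept)
--     fact = 1
--     for i in range(1, a + 1):
--         fact = fact * i % p
--     # inverse factorials 1/k! mod p for k = 0..a+1
--     finv = [1] * (a + 2)
--     finv[a + 1] = pow(fact * (a + 1) % p, p - 2, p)
--     for i in range(a + 1, 0, -1):
--         finv[i - 1] = finv[i] * i % p
--     # scaled Bernoulli numbers b_i = B_i / i! mod p, computed push-style:
--     # once b_i is known its contribution is pushed to every later accumulator
--     acc = [0] * (a + 1)
--     bern = [0] * (a + 1)
--     for i in range(a + 1):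
--         b = 1 if i == 0 else (-acc[i]) % p
--         bern[i] = b
--         for k in range(i + 1, a + 1):
--             acc[k] = (acc[k] + b * finv[k - i + 1]) % p
--     bern[1] = p - bern[1]
--     # Horner evaluation of the Faulhaber polynomial; no modular inverse of n needed
--     r = 0
--     for i in range(a + 1):
--         r = (r + bern[i] * finv[a + 1 - i]) * n % p
--     return r * fact % p
-- ===== Notes on version B (the rewrite author's own statement) =====
-- stated objective: alternative
-- what changed: B evaluates the Faulhaber polynomial by Horner's scheme (no modular inverse of n and no descending power chain), builds the Bernoulli table push-style with per-step reduction mod p, and keeps a single running factorial instead of A's factorial table.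
-- outside the precondition, e.g. on solveb1p(3, 1, 9): A returns 0, B returns 6; on solveb1p(7, 2, 10): A returns 8, B returns 0
import Mathlib
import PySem

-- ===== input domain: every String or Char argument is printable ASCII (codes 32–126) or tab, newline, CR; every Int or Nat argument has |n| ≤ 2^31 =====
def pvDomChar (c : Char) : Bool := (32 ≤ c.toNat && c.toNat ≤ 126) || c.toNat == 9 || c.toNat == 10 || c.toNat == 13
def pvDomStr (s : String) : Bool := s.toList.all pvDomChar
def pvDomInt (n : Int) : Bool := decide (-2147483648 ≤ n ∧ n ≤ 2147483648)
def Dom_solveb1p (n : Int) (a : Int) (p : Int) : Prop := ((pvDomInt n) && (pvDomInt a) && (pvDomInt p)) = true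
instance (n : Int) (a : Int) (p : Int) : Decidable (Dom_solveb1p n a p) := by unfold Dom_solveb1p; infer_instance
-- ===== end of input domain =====

-- B replaces A's descending-powers evaluation (which needs the modular inverse of n) by a Horner
-- evaluation of the Faulhaber polynomial and computes the Bernoulli-number table push-style with a
-- running factorial instead of a factorial table; objective: alternative (same O(a²) cost).

-- ===== PORT A =====
-- pow(b, e, m) with e ≥ 0, m > 0, ported by hand as CPython computes it (binary square-and-multiply,
-- reducing mod m at every step; exact for e ≥ 0 and m > 0, which Pre_ guarantees at every call site).
def pyPowMod (m b : Int) (e : Nat) : Int :=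
  if e = 0 then PySem.Int.mod 1 m
  else
    let h := pyPowMod m b (e / 2)
    if e % 2 = 0 then PySem.Int.mod (h * h) m
    else PySem.Int.mod (h * h * b) m
termination_by e
decreasing_by exact Nat.div_lt_self (Nat.pos_of_ne_zero (by assumption)) one_lt_two

def solveb1p (n : Int) (a : Int) (p : Int) : Int :=
  if a == 0 then PySem.Int.mod (n + 1) p
  else if PySem.Int.mod a (p - 1) == 0 then
    PySem.Int.mod (n - PySem.Int.floordiv n p) p
  else
    let a := PySem.Int.mod a (p - 1)
    let factlist : List Int := (PySem.List.pyRange 1 (a + 2) 1).foldl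
      (fun l i => l ++ [PySem.Int.mod (PySem.List.pyGetD l (-1) 0 * i) p]) [1]
    let factinvlist : List Int :=
      PySem.List.pySetD (List.replicate factlist.length 1) (-1)
        (pyPowMod p (PySem.List.pyGetD factlist (-1) 0) (p - 2).toNat)
    let factinvlist : List Int :=
      (PySem.List.pyRange (PySem.List.len factinvlist - 1) 0 (-1)).foldl
        (fun l i => PySem.List.pySetD l (i - 1) (PySem.Int.mod (PySem.List.pyGetD l i 0 * i) p))
        factinvlist
    let bernlist : List Int := PySem.List.pySetD (List.replicate (a + 1).toNat 0) 0 1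
    let bernlist : List Int := (PySem.List.pyRange 1 (a + 1) 1).foldl
      (fun bl i =>
        PySem.List.pySetD bl i (PySem.Int.mod
          ((PySem.List.pyRange 0 i 1).foldl
            (fun s j => s - PySem.List.pyGetD bl j 0 * PySem.List.pyGetD factinvlist (i - j + 1) 0)
            (PySem.List.pyGetD bl i 0)) p)) bernlist
    let bernlist : List Int := PySem.List.pySetD bernlist 1 (p - PySem.List.pyGetD bernlist 1 0)
    let npow := pyPowMod p n (a + 1).toNat
    let ninv := pyPowMod p n (p - 2).toNat
    let st : Int × Int := (PySem.List.pyRange 0 (a + 1) 1).foldl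
      (fun (st : Int × Int) i =>
        (st.1 + PySem.List.pyGetD bernlist i 0 * st.2 * PySem.List.pyGetD factinvlist (a + 1 - i) 0,
         PySem.Int.mod (st.2 * ninv) p)) (0, npow)
    PySem.Int.mod (st.1 * PySem.List.pyGetD factlist a 0) p

-- ===== PORT B =====
def solveb1p_alt (n : Int) (a : Int) (p : Int) : Int :=
  if a == 0 then PySem.Int.mod (n + 1) p
  else if PySem.Int.mod a (p - 1) == 0 then
    PySem.Int.mod (n - PySem.Int.floordiv n p) p
  else
    let a := PySem.Int.mod a (p - 1)
    let fact : Int := (PySem.List.pyRange 1 (a + 1) 1).foldl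
      (fun f i => PySem.Int.mod (f * i) p) 1
    let finv : List Int :=
      PySem.List.pySetD (List.replicate (a + 2).toNat 1) (a + 1)
        (pyPowMod p (PySem.Int.mod (fact * (a + 1)) p) (p - 2).toNat)
    let finv : List Int := (PySem.List.pyRange (a + 1) 0 (-1)).foldl
      (fun l i => PySem.List.pySetD l (i - 1) (PySem.Int.mod (PySem.List.pyGetD l i 0 * i) p))
      finv
    let stb : List Int × List Int := (PySem.List.pyRange 0 (a + 1) 1).foldl
      (fun (st : List Int × List Int) i =>
        let b := if i == 0 then 1 else PySem.Int.mod (-(PySem.List.pyGetD st.2 i 0)) p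
        (PySem.List.pySetD st.1 i b,
         (PySem.List.pyRange (i + 1) (a + 1) 1).foldl
           (fun ac k => PySem.List.pySetD ac k (PySem.Int.mod
             (PySem.List.pyGetD ac k 0 + b * PySem.List.pyGetD finv (k - i + 1) 0) p)) st.2))
      (List.replicate (a + 1).toNat 0, List.replicate (a + 1).toNat 0)
    let bern : List Int := PySem.List.pySetD stb.1 1 (p - PySem.List.pyGetD stb.1 1 0)
    let r : Int := (PySem.List.pyRange 0 (a + 1) 1).foldl
      (fun r i => PySem.Int.mod
        ((r + PySem.List.pyGetD bern i 0 * PySem.List.pyGetD finv (a + 1 - i) 0) * n) p) 0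
    PySem.Int.mod (r * fact) p

-- ===== PRECONDITION & SPEC =====
-- Pre_ admits a prime modulus p (the function's stated domain: Faulhaber mod a prime) and, for any
-- nonzero modulus, the two early special cases a = 0 and (p-1) | a.  It excludes composite p reaching
-- the main path, where A still returns but pow(·, p-2, p) is no modular inverse and the value is
-- meaningless, and the moduli p = 0 (and p = 1 with a ≠ 0) on which A raises ZeroDivisionError/ValueError.
def Pre_solveb1p (n : Int) (a : Int) (p : Int) : Prop :=
  Nat.Prime p.toNat ∨ (a = 0 ∧ p ≠ 0) ∨ (a ≠ 0 ∧ p ≠ 0 ∧ (p - 1) ∣ a)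
instance (n : Int) (a : Int) (p : Int) : Decidable (Pre_solveb1p n a p) := by
  unfold Pre_solveb1p; infer_instance
def pvWitness_solveb1p : Int × Int × Int := (5, 3, 7)

def Spec_solveb1p (n : Int) (a : Int) (p : Int) (out : Int) : Prop := out = solveb1p_alt n a p
instance (n : Int) (a : Int) (p : Int) (out : Int) : Decidable (Spec_solveb1p n a p out) := by
  unfold Spec_solveb1p; infer_instance

-- ===== CLAIM (what is proved, stated in full; the proofs are below) =====
def Claim_equal_solveb1p : Prop := ∀ (n : Int) (a : Int) (p : Int),
  Dom_solveb1p n a p → Pre_solveb1p n a p → Spec_solveb1p n a p (solveb1p n a p)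

-- ===== LEMMAS AND PROOFS =====

-- reference sequences ------------------------------------------------------

-- k! mod p, as both factorial loops build it
def factm (p : Int) : Nat → Int
  | 0 => 1
  | k + 1 => PySem.Int.mod (factm p k * ((k : Int) + 1)) p

-- the backward inverse-factorial fill, by distance d from the top index T
def finvg (p s : Int) (T : Nat) : Nat → Int
  | 0 => s
  | d + 1 => PySem.Int.mod (finvg p s T d * ((T : Int) - (d : Int))) p

-- the scaled Bernoulli table b_i = B_i/i! mod p as A's recurrence defines it
def bernL (p : Int) (fi : Nat → Int) : Nat → List Int
  | 0 => [1]
  | i + 1 => bernL p fi i ++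
      [PySem.Int.mod (-(((List.range (i + 1)).map
        (fun j => (bernL p fi i).getD j 0 * fi (i + 1 - j + 1))).sum)) p]

def br (p : Int) (fi : Nat → Int) (i : Nat) : Int := (bernL p fi i).getD i 0

-- B's chain-modded accumulator value at index k after m outer steps
def accv (p : Int) (fi bf : Nat → Int) (m k : Nat) : Int :=
  (List.range (min m k)).foldl
    (fun s j => PySem.Int.mod (s + bf j * fi (k - j + 1)) p) 0

-- A's descending power chain
def npw (p n ninv : Int) (K : Nat) : Nat → Int
  | 0 => pyPowMod p n (K + 1)
  | i + 1 => PySem.Int.mod (npw p n ninv K i * ninv) p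

-- B's Horner chain
def rh (p n : Int) (c : Nat → Int) : Nat → Int
  | 0 => 0
  | m + 1 => PySem.Int.mod ((rh p n c m + c m) * n) p

-- basic list bookkeeping ---------------------------------------------------

lemma mapRange_set (N k : Nat) (f : Nat → Int) (v : Int) (_hk : k < N) :
    ((List.range N).map f).set k v
      = (List.range N).map (fun j => if j = k then v else f j) := by
  apply List.ext_getElem
  · simp
  · intro i h1 h2
    simp only [List.getElem_set, List.getElem_map, List.getElem_range]
    simp at h1
    by_cases hik : k = i <;> simp [hik]
    omega

lemma pySetD_neg_one' (l : List Int) (v : Int) (h : l ≠ []) :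
    PySem.List.pySetD l (-1) v = l.set (l.length - 1) v := by
  have hl : 0 < l.length := List.length_pos_iff.mpr h
  simp only [PySem.List.pySetD, PySem.List.pySet?, PySem.List.pyIdx?]
  rw [if_neg (by omega), if_pos (by omega)]
  simp

lemma pyRange_neg_one_cons (t : Nat) :
    PySem.List.pyRange ((t : Int) + 1) 0 (-1)
      = ((t : Int) + 1) :: PySem.List.pyRange (t : Int) 0 (-1) := by
  rw [PySem.List.pyRange_neg_one, PySem.List.pyRange_neg_one]
  have h1 : ((t : Int) + 1 - 0).toNat = t + 1 := by omega
  have h2 : ((t : Int) - 0).toNat = t := by omega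
  rw [h1, h2, List.range_succ_eq_map]
  simp only [List.map_cons, List.map_map]
  congr 1
  apply List.map_congr_left; intro k hk; simp only [Function.comp_apply]; push_cast; ring

lemma replicate_eq_mapRange (N : Nat) (c : Int) :
    List.replicate N c = (List.range N).map (fun _ => c) := by
  apply List.ext_getElem
  · simp
  · intro i h1 h2; simp

-- fold characterizations ---------------------------------------------------

lemma factfold_list (p : Int) (m : Nat) :
    (PySem.List.pyRange 1 ((m : Int) + 1) 1).foldl
      (fun l i => l ++ [PySem.Int.mod (PySem.List.pyGetD l (-1) 0 * i) p]) [1]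
      = (List.range (m + 1)).map (factm p) := by
  induction m with
  | zero => rw [show ((0:Nat):Int) + 1 = 1 by norm_num, PySem.List.pyRange_one_eq_nil le_rfl]; rfl
  | succ k ih =>
    rw [show ((k+1:Nat):Int) + 1 = ((k:Int) + 1) + 1 by push_cast; ring,
        PySem.List.pyRange_one_succ_right (by omega), List.foldl_append]
    simp only [List.foldl_cons, List.foldl_nil, ih]
    have hsplit : (List.range (k+1)).map (factm p) = (List.range k).map (factm p) ++ [factm p k] := by
      rw [List.range_succ, List.map_append]; rfl
    rw [hsplit, PySem.List.pyGetD_neg_one_append_singleton, List.range_succ (n := k+1),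
        List.map_append, ← hsplit]
    rfl

lemma factfold_scalar (p : Int) (m : Nat) :
    (PySem.List.pyRange 1 ((m : Int) + 1) 1).foldl
      (fun f i => PySem.Int.mod (f * i) p) 1 = factm p m := by
  induction m with
  | zero => rw [show ((0:Nat):Int) + 1 = 1 by norm_num, PySem.List.pyRange_one_eq_nil le_rfl]; rfl
  | succ k ih =>
    rw [show ((k+1:Nat):Int) + 1 = ((k:Int) + 1) + 1 by push_cast; ring,
        PySem.List.pyRange_one_succ_right (by omega), List.foldl_append]
    simp only [List.foldl_cons, List.foldl_nil, ih]
    rfl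

lemma foldl_sub_range (g : Int → Int) (c : Int) (m : Nat) :
    (PySem.List.pyRange 0 (m : Int) 1).foldl (fun s j => s - g j) c
      = c - ((List.range m).map (fun (j : Nat) => g (j : Int))).sum := by
  induction m generalizing c with
  | zero => rw [show ((0:Nat):Int) = 0 from rfl, PySem.List.pyRange_one_eq_nil le_rfl]; simp
  | succ k ih =>
    rw [show ((k+1:Nat):Int) = ((k:Int)) + 1 by push_cast; ring,
        PySem.List.pyRange_one_succ_right (by omega), List.foldl_append]
    simp only [List.foldl_cons, List.foldl_nil]
    rw [ih, List.range_succ, List.map_append, List.sum_append]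
    simp only [List.map_cons, List.map_nil, List.sum_cons, List.sum_nil]
    ring

lemma finvfill (p s : Int) (T : Nat) (t : Nat) (ht : t ≤ T) :
    (PySem.List.pyRange (t : Int) 0 (-1)).foldl
      (fun l i => PySem.List.pySetD l (i - 1)
        (PySem.Int.mod (PySem.List.pyGetD l i 0 * i) p))
      ((List.range (T + 1)).map (fun k => if t ≤ k then finvg p s T (T - k) else 1))
      = (List.range (T + 1)).map (fun k => finvg p s T (T - k)) := by
  induction t with
  | zero =>
    rw [show ((0:Nat):Int) = 0 from rfl, PySem.List.pyRange_neg_one]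
    simp
  | succ u ih =>
    rw [show ((u+1:Nat):Int) = (u:Int) + 1 by push_cast; ring, pyRange_neg_one_cons,
        List.foldl_cons]
    have hread : PySem.List.pyGetD ((List.range (T + 1)).map
        (fun k => if u + 1 ≤ k then finvg p s T (T - k) else 1)) ((u:Int)+1) 0
        = finvg p s T (T - (u+1)) := by
      rw [show ((u:Int)+1) = ((u+1 : Nat) : Int) by push_cast; ring,
          PySem.List.pyGetD_natCast, PySem.List.getD_map_range _ _ _ _ (by omega)]
      simp
    rw [hread]
    have hset : PySem.List.pySetD ((List.range (T + 1)).map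
          (fun k => if u + 1 ≤ k then finvg p s T (T - k) else 1)) ((u:Int) + 1 - 1)
          (PySem.Int.mod (finvg p s T (T - (u+1)) * ((u:Int)+1)) p)
        = (List.range (T + 1)).map (fun k => if u ≤ k then finvg p s T (T - k) else 1) := by
      rw [show ((u:Int) + 1 - 1) = ((u : Nat) : Int) by ring,
          PySem.List.pySetD_natCast, mapRange_set _ _ _ _ (by omega)]
      apply List.map_congr_left
      intro k hk
      simp only [List.mem_range] at hk
      by_cases hku : k = u
      · subst hku
        simp only [if_pos le_rfl]
        have h3 : T - k = (T - (k+1)) + 1 := by omega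
        rw [h3]
        show PySem.Int.mod (finvg p s T (T - (k+1)) * ((k:Int)+1)) p
          = PySem.Int.mod (finvg p s T (T - (k+1)) * ((T:Int) - ((T - (k+1) : Nat) : Int))) p
        rw [show ((T:Int) - ((T - (k+1) : Nat) : Int)) = (k:Int) + 1 by omega]
      · by_cases hle : u ≤ k
        · rw [if_neg hku, if_pos (by omega), if_pos hle]
        · rw [if_neg hku, if_neg (by omega), if_neg hle]
    rw [hset, ih (by omega)]

lemma pushfill (g : Int → Int → Int) (N : Nat) (f : Nat → Int) (s e : Nat)
    (hse : s ≤ e) (heN : e ≤ N) :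
    (PySem.List.pyRange (s : Int) (e : Int) 1).foldl
      (fun ac k => PySem.List.pySetD ac k (g (PySem.List.pyGetD ac k 0) k))
      ((List.range N).map f)
      = (List.range N).map (fun k => if s ≤ k ∧ k < e then g (f k) (k : Int) else f k) := by
  induction e with
  | zero =>
    rw [show ((0:Nat):Int) = 0 from rfl, PySem.List.pyRange_one_eq_nil (by omega)]
    simp only [List.foldl_nil]
    apply List.map_congr_left; intro k hk
    rw [if_neg (by omega)]
  | succ u ih =>
    by_cases hsu : s ≤ u
    · rw [show ((u+1:Nat):Int) = (u:Int) + 1 by push_cast; ring,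
          PySem.List.pyRange_one_succ_right (by exact_mod_cast hsu), List.foldl_append]
      rw [ih hsu (by omega)]
      simp only [List.foldl_cons, List.foldl_nil]
      have hread : PySem.List.pyGetD ((List.range N).map
          (fun k => if s ≤ k ∧ k < u then g (f k) (k:Int) else f k)) ((u:Int)) 0 = f u := by
        rw [PySem.List.pyGetD_natCast, PySem.List.getD_map_range _ _ _ _ (by omega)]
        rw [if_neg (by omega)]
      rw [hread, PySem.List.pySetD_natCast, mapRange_set _ _ _ _ (by omega)]
      apply List.map_congr_left; intro k hk
      simp only [List.mem_range] at hk
      by_cases hku : k = u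
      · subst hku; rw [if_pos rfl, if_pos ⟨hsu, by omega⟩]
      · rw [if_neg hku]
        by_cases hc : s ≤ k ∧ k < u
        · rw [if_pos hc, if_pos ⟨hc.1, by omega⟩]
        · rw [if_neg hc, if_neg (by omega)]
    · have hes : u + 1 = s := by omega
      rw [hes, PySem.List.pyRange_one_eq_nil le_rfl]
      simp only [List.foldl_nil]
      apply List.map_congr_left; intro k hk
      rw [if_neg (by omega)]

-- bern table lemmas --------------------------------------------------------

lemma length_bernL (p : Int) (fi : Nat → Int) (i : Nat) : (bernL p fi i).length = i + 1 := by
  induction i with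
  | zero => rfl
  | succ k ih => simp [bernL, ih]

lemma bernL_getD (p : Int) (fi : Nat → Int) (i j : Nat) (h : j ≤ i) :
    (bernL p fi i).getD j 0 = br p fi j := by
  induction i with
  | zero => interval_cases j; rfl
  | succ k ih =>
    rcases Nat.lt_or_ge j (k+1) with hj | hj
    · show (bernL p fi k ++ _).getD j 0 = _
      rw [List.getD_append _ _ _ _ (by rw [length_bernL]; omega)]
      exact ih (by omega)
    · have : j = k + 1 := by omega
      subst this; rfl

lemma br_succ (p : Int) (fi : Nat → Int) (i : Nat) :
    br p fi (i + 1) = PySem.Int.mod (-(((List.range (i + 1)).map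
      (fun j => br p fi j * fi (i + 1 - j + 1))).sum)) p := by
  show (bernL p fi (i+1)).getD (i+1) 0 = _
  rw [show bernL p fi (i+1) = bernL p fi i ++
      [PySem.Int.mod (-(((List.range (i + 1)).map
        (fun j => (bernL p fi i).getD j 0 * fi (i + 1 - j + 1))).sum)) p] from rfl]
  rw [List.getD_append_right _ _ _ _ (by rw [length_bernL])]
  rw [length_bernL]
  simp only [Nat.sub_self, List.getD_cons_zero]
  congr 2
  apply congrArg
  apply List.map_congr_left; intro j hj
  simp only [List.mem_range] at hj
  rw [bernL_getD _ _ _ _ (by omega)]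

-- congruence tools ---------------------------------------------------------

lemma castMod (p x : Int) (hp : 0 < p) :
    ((PySem.Int.mod x p : Int) : ZMod p.toNat) = (x : ZMod p.toNat) := by
  rw [PySem.Int.mod_eq_emod_of_pos hp]
  rw [show p = ((p.toNat : Nat) : Int) by omega]
  exact ZMod.intCast_mod x p.toNat

lemma modCongr (p x y : Int) (hp : 0 < p)
    (h : (x : ZMod p.toNat) = (y : ZMod p.toNat)) :
    PySem.Int.mod x p = PySem.Int.mod y p := by
  rw [PySem.Int.mod_eq_emod_of_pos hp, PySem.Int.mod_eq_emod_of_pos hp]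
  have := (ZMod.intCast_eq_intCast_iff' x y p.toNat).mp h
  rwa [show ((p.toNat : Nat) : Int) = p by omega] at this

lemma castPowMod (p b : Int) (e : Nat) (hp : 0 < p) :
    ((pyPowMod p b e : Int) : ZMod p.toNat) = (b : ZMod p.toNat) ^ e := by
  induction e using Nat.strong_induction_on with
  | _ e ih =>
    rw [pyPowMod]
    by_cases h0 : e = 0
    · subst h0; simp [castMod _ _ hp]
    · rw [if_neg h0]
      simp only []
      have ih2 := ih (e/2) (Nat.div_lt_self (Nat.pos_of_ne_zero h0) one_lt_two)
      by_cases h2 : e % 2 = 0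
      · rw [if_pos h2, castMod _ _ hp]
        push_cast
        rw [ih2, ← pow_add]
        congr 1
        omega
      · rw [if_neg h2, castMod _ _ hp]
        push_cast
        rw [ih2, ← pow_add, ← pow_succ]
        congr 1
        omega

-- a chain-modded running sum is congruent to the plain sum
lemma chain_cast (p : Int) (hp : 0 < p) (h : Nat → Int) (m : Nat) :
    (((List.range m).foldl (fun s j => PySem.Int.mod (s + h j) p) 0 : Int) : ZMod p.toNat)
      = ((((List.range m).map h).sum : Int) : ZMod p.toNat) := by
  induction m with
  | zero => simp
  | succ k ih =>
    rw [List.range_succ, List.foldl_append, List.map_append, List.sum_append]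
    simp only [List.foldl_cons, List.foldl_nil, List.map_cons, List.map_nil,
      List.sum_cons, List.sum_nil]
    rw [castMod _ _ hp]
    push_cast
    rw [ih]
    push_cast
    ring

-- loop invariants for the four main folds -----------------------------------

lemma bernAfold (p : Int) (FI : List Int) (fi : Nat → Int) (K : Nat)
    (hFI : ∀ k, k ≤ K + 1 → PySem.List.pyGetD FI (k : Int) 0 = fi k) (m : Nat) (hm : m ≤ K) :
    (PySem.List.pyRange 1 ((m : Int) + 1) 1).foldl
      (fun bl i =>
        PySem.List.pySetD bl i (PySem.Int.mod
          ((PySem.List.pyRange 0 i 1).foldl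
            (fun s j => s - PySem.List.pyGetD bl j 0 * PySem.List.pyGetD FI (i - j + 1) 0)
            (PySem.List.pyGetD bl i 0)) p))
      ((List.range (K + 1)).map (fun k => if k ≤ 0 then br p fi k else 0))
      = (List.range (K + 1)).map (fun k => if k ≤ m then br p fi k else 0) := by
  induction m with
  | zero => rw [show ((0:Nat):Int) + 1 = 1 by norm_num, PySem.List.pyRange_one_eq_nil le_rfl]; rfl
  | succ u ih =>
    rw [show ((u+1:Nat):Int) + 1 = ((u:Int) + 1) + 1 by push_cast; ring,
        PySem.List.pyRange_one_succ_right (by omega), List.foldl_append, ih (by omega)]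
    simp only [List.foldl_cons, List.foldl_nil]
    rw [show ((u:Int) + 1) = ((u+1 : Nat) : Int) by push_cast; ring]
    have hread : PySem.List.pyGetD ((List.range (K + 1)).map
        (fun k => if k ≤ u then br p fi k else 0)) ((u+1 : Nat) : Int) 0 = 0 := by
      rw [PySem.List.pyGetD_natCast, PySem.List.getD_map_range _ _ _ _ (by omega),
          if_neg (by omega)]
    rw [hread, foldl_sub_range]
    have hterm : ((List.range (u+1)).map (fun (j : Nat) =>
          PySem.List.pyGetD ((List.range (K + 1)).map
            (fun k => if k ≤ u then br p fi k else 0)) (j : Int) 0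
          * PySem.List.pyGetD FI (((u+1 : Nat) : Int) - (j : Int) + 1) 0)).sum
        = ((List.range (u+1)).map (fun j => br p fi j * fi (u + 1 - j + 1))).sum := by
      apply congrArg
      apply List.map_congr_left
      intro j hj
      simp only [List.mem_range] at hj
      rw [PySem.List.pyGetD_natCast, PySem.List.getD_map_range _ _ _ _ (by omega),
          if_pos (by omega),
          show (((u+1 : Nat) : Int) - (j : Int) + 1) = ((u + 1 - j + 1 : Nat) : Int) by
            push_cast; omega,
          hFI _ (by omega)]
    rw [hterm, zero_sub, ← br_succ]
    rw [PySem.List.pySetD_natCast, mapRange_set _ _ _ _ (by omega)]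
    apply List.map_congr_left
    intro k hk
    simp only [List.mem_range] at hk
    by_cases hku : k = u + 1
    · subst hku; rw [if_pos rfl, if_pos le_rfl]
    · by_cases hle : k ≤ u
      · rw [if_neg hku, if_pos hle, if_pos (by omega)]
      · rw [if_neg hku, if_neg hle, if_neg (by omega)]

lemma bernBfold (p : Int) (FI : List Int) (fi : Nat → Int) (K : Nat) (hp : 0 < p)
    (hFI : ∀ k, k ≤ K + 1 → PySem.List.pyGetD FI (k : Int) 0 = fi k) (m : Nat) (hm : m ≤ K + 1) :
    (PySem.List.pyRange 0 (m : Int) 1).foldl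
      (fun (st : List Int × List Int) i =>
        let b := if i == 0 then 1 else PySem.Int.mod (-(PySem.List.pyGetD st.2 i 0)) p
        (PySem.List.pySetD st.1 i b,
         (PySem.List.pyRange (i + 1) ((K : Int) + 1) 1).foldl
           (fun ac k => PySem.List.pySetD ac k (PySem.Int.mod
             (PySem.List.pyGetD ac k 0 + b * PySem.List.pyGetD FI (k - i + 1) 0) p)) st.2))
      ((List.range (K + 1)).map (fun _ => 0), (List.range (K + 1)).map (fun _ => 0))
      = ((List.range (K + 1)).map (fun k => if k < m then br p fi k else 0),
         (List.range (K + 1)).map (fun k => accv p fi (br p fi) m k)) := by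
  induction m with
  | zero =>
    rw [show ((0:Nat):Int) = 0 from rfl, PySem.List.pyRange_one_eq_nil le_rfl]
    simp only [List.foldl_nil]
    constructor
  | succ u ih =>
    rw [show ((u+1:Nat):Int) = ((u:Int)) + 1 by push_cast; ring,
        PySem.List.pyRange_one_succ_right (by omega), List.foldl_append, ih (by omega)]
    simp only [List.foldl_cons, List.foldl_nil]
    rw [show ((u:Int)) = ((u : Nat) : Int) from rfl]
    have hb : (if ((u : Nat) : Int) == 0 then (1:Int)
        else PySem.Int.mod (-(PySem.List.pyGetD ((List.range (K + 1)).map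
          (fun k => accv p fi (br p fi) u k)) ((u : Nat) : Int) 0)) p) = br p fi u := by
      rcases Nat.eq_zero_or_pos u with hu | hu
      · subst hu; rfl
      · rw [if_neg (by simp; omega)]
        rw [PySem.List.pyGetD_natCast, PySem.List.getD_map_range _ _ _ _ (by omega)]
        obtain ⟨v, rfl⟩ : ∃ v, u = v + 1 := ⟨u - 1, by omega⟩
        rw [br_succ]
        apply modCongr _ _ _ hp
        rw [Int.cast_neg, Int.cast_neg]
        apply congrArg
        show ((accv p fi (br p fi) (v+1) (v+1) : Int) : ZMod p.toNat) = _
        unfold accv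
        rw [Nat.min_self]
        exact chain_cast _ hp _ _
    rw [hb, Prod.mk.injEq]
    constructor
    · rw [PySem.List.pySetD_natCast, mapRange_set _ _ _ _ (by omega)]
      apply List.map_congr_left
      intro k hk
      simp only [List.mem_range] at hk
      by_cases hku : k = u
      · subst hku; rw [if_pos rfl, if_pos (by omega)]
      · by_cases hlt : k < u
        · rw [if_neg hku, if_pos hlt, if_pos (by omega)]
        · rw [if_neg hku, if_neg hlt, if_neg (by omega)]
    · rw [show ((u : Nat) : Int) + 1 = ((u + 1 : Nat) : Int) by push_cast; ring,
          show ((K : Int) + 1) = ((K + 1 : Nat) : Int) by push_cast; ring,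
          pushfill (fun old k => PySem.Int.mod (old + br p fi u
              * PySem.List.pyGetD FI (k - ((u:Nat):Int) + 1) 0) p) (K+1)
            (fun k => accv p fi (br p fi) u k) (u+1) (K+1) (by omega) le_rfl]
      apply List.map_congr_left
      intro k hk
      simp only [List.mem_range] at hk
      by_cases hc : u + 1 ≤ k ∧ k < K + 1
      · rw [if_pos hc]
        have hidx : ((k : Nat) : Int) - ((u : Nat) : Int) + 1 = ((k - u + 1 : Nat) : Int) := by
          push_cast; omega
        rw [hidx, hFI _ (by omega)]
        show PySem.Int.mod (accv p fi (br p fi) u k + br p fi u * fi (k - u + 1)) p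
            = accv p fi (br p fi) (u+1) k
        unfold accv
        rw [show min (u+1) k = u + 1 by omega, show min u k = u by omega,
            List.range_succ, List.foldl_append]
        rfl
      · rw [if_neg hc]
        show accv p fi (br p fi) u k = accv p fi (br p fi) (u+1) k
        unfold accv
        rw [show min u k = min (u+1) k by omega]

lemma loopAfold (p n ninv : Int) (BL FI : List Int) (K : Nat) (m : Nat) :
    (PySem.List.pyRange 0 (m : Int) 1).foldl
      (fun (st : Int × Int) i =>
        (st.1 + PySem.List.pyGetD BL i 0 * st.2 * PySem.List.pyGetD FI ((K : Int) + 1 - i) 0,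
         PySem.Int.mod (st.2 * ninv) p)) (0, npw p n ninv K 0)
      = (((List.range m).map (fun (i : Nat) =>
            PySem.List.pyGetD BL (i : Int) 0 * npw p n ninv K i
              * PySem.List.pyGetD FI ((K : Int) + 1 - (i : Int)) 0)).sum,
         npw p n ninv K m) := by
  induction m with
  | zero =>
    rw [show ((0:Nat):Int) = 0 from rfl, PySem.List.pyRange_one_eq_nil le_rfl]
    simp
  | succ k ih =>
    rw [show ((k+1:Nat):Int) = ((k:Int)) + 1 by push_cast; ring,
        PySem.List.pyRange_one_succ_right (by omega), List.foldl_append, ih]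
    simp only [List.foldl_cons, List.foldl_nil]
    rw [List.range_succ, List.map_append, List.sum_append]
    simp only [List.map_cons, List.map_nil, List.sum_cons, List.sum_nil]
    simp only [add_zero]; rfl

lemma loopBfold (p n : Int) (BL FI : List Int) (K : Nat) (m : Nat) :
    (PySem.List.pyRange 0 (m : Int) 1).foldl
      (fun r i => PySem.Int.mod
        ((r + PySem.List.pyGetD BL i 0 * PySem.List.pyGetD FI ((K : Int) + 1 - i) 0) * n) p) 0
      = rh p n (fun (i : Nat) => PySem.List.pyGetD BL (i : Int) 0
          * PySem.List.pyGetD FI ((K : Int) + 1 - (i : Int)) 0) m := by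
  induction m with
  | zero =>
    rw [show ((0:Nat):Int) = 0 from rfl, PySem.List.pyRange_one_eq_nil le_rfl]
    rfl
  | succ k ih =>
    rw [show ((k+1:Nat):Int) = ((k:Int)) + 1 by push_cast; ring,
        PySem.List.pyRange_one_succ_right (by omega), List.foldl_append, ih]
    rfl

lemma rh_cast (p n : Int) (c : Nat → Int) (hp : 0 < p) (m : Nat) :
    ((rh p n c m : Int) : ZMod p.toNat)
      = ∑ i ∈ Finset.range m, (c i : ZMod p.toNat) * (n : ZMod p.toNat) ^ (m - i) := by
  induction m with
  | zero => simp [rh]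
  | succ k ih =>
    show ((PySem.Int.mod ((rh p n c k + c k) * n) p : Int) : ZMod p.toNat) = _
    rw [castMod _ _ hp]
    push_cast
    rw [ih, Finset.sum_range_succ, add_mul, Finset.sum_mul]
    congr 1
    · apply Finset.sum_congr rfl
      intro i hi
      simp only [Finset.mem_range] at hi
      rw [mul_assoc, ← pow_succ]
      congr 2
      omega
    · rw [show k + 1 - k = 1 by omega, pow_one]

lemma npw_cast (p n ninv : Int) (K : Nat) (hp : 0 < p) (i : Nat) :
    ((npw p n ninv K i : Int) : ZMod p.toNat)
      = (n : ZMod p.toNat) ^ (K + 1) * ((ninv : ZMod p.toNat)) ^ i := by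
  induction i with
  | zero => show ((pyPowMod p n (K+1) : Int) : ZMod p.toNat) = _
            rw [castPowMod _ _ _ hp]; ring
  | succ k ih =>
    show ((PySem.Int.mod (npw p n ninv K k * ninv) p : Int) : ZMod p.toNat) = _
    rw [castMod _ _ hp]; push_cast; rw [ih]; ring

-- Fermat's little theorem, in the form the two evaluation loops need
lemma fermat_term (P : Nat) (hP : P.Prime) (x : ZMod P) (K i : Nat)
    (hi : i ≤ K) (hK : K + 2 ≤ P) :
    x ^ (K + 1) * (x ^ (P - 2)) ^ i = x ^ (K + 1 - i) := by
  by_cases hx : x = 0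
  · subst hx
    rw [zero_pow (show K+1-i ≠ 0 by omega), zero_pow (show K+1 ≠ 0 by omega), zero_mul]
  · haveI : Fact P.Prime := ⟨hP⟩
    have hf : x ^ (P - 1) = 1 := ZMod.pow_card_sub_one_eq_one hx
    calc x ^ (K + 1) * (x ^ (P - 2)) ^ i
        = x ^ (K + 1 - i) * x ^ i * (x ^ (P - 2)) ^ i := by
          rw [← pow_add, show K + 1 - i + i = K + 1 by omega]
      _ = x ^ (K + 1 - i) * (x ^ (P - 1)) ^ i := by
          rw [mul_assoc, ← mul_pow, ← pow_succ']
          congr 3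
          omega
      _ = x ^ (K + 1 - i) := by rw [hf, one_pow, mul_one]

-- ===== VERDICT (by name: the statement is the Claim_ definition above) =====
theorem solveb1p_spec : Claim_equal_solveb1p := by
  intro n a p hdom hpre
  unfold Spec_solveb1p
  unfold Pre_solveb1p at hpre
  by_cases ha0 : (a == 0) = true
  · unfold solveb1p solveb1p_alt; rw [if_pos ha0, if_pos ha0]
  · by_cases hb0 : (PySem.Int.mod a (p-1) == 0) = true
    · unfold solveb1p solveb1p_alt
      rw [if_neg ha0, if_neg ha0, if_pos hb0, if_pos hb0]
    · have hb0' : PySem.Int.mod a (p-1) ≠ 0 := by simpa using hb0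
      -- on the main path Pre_ reduces to primality
      have hpre : Nat.Prime p.toNat := by
        rcases hpre with h | ⟨h, _⟩ | ⟨_, _, h⟩
        · exact h
        · exact absurd (by simp [h]) ha0
        · exact absurd ((PySem.Int.mod_eq_zero_iff_dvd a (p-1)).mpr h) hb0'
      have hp2 : 2 ≤ p := by have := hpre.two_le; omega
      have hp3 : 3 ≤ p := by
        rcases eq_or_lt_of_le hp2 with h | h
        · exfalso; apply hb0'
          rw [← h, PySem.Int.mod_eq_emod_of_pos (by omega)]
          simp
        · omega
      have hA0 : 0 ≤ PySem.Int.mod a (p-1) := PySem.Int.mod_nonneg a (by omega)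
      have hAlt : PySem.Int.mod a (p-1) < p - 1 := PySem.Int.mod_lt a (by omega)
      obtain ⟨K, hK⟩ : ∃ K : Nat, PySem.Int.mod a (p-1) = (K : Int) :=
        ⟨(PySem.Int.mod a (p-1)).toNat, by omega⟩
      have hK1 : 1 ≤ K := by
        rcases Nat.eq_zero_or_pos K with h | h
        · exfalso; apply hb0'; rw [hK, h]; rfl
        · exact h
      have hKp : (K : Int) ≤ p - 2 := by omega
      have hPK : K + 2 ≤ p.toNat := by omega
      have hp0 : (0:Int) < p := by omega
      unfold solveb1p solveb1p_alt
      rw [if_neg ha0, if_neg ha0, if_neg hb0, if_neg hb0, hK]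
      simp only []
      -- normalize the Nat-valued sizes
      rw [show ((K:Int)+1).toNat = K+1 by omega, show ((K:Int)+2).toNat = K+2 by omega]
      -- the factorial folds
      rw [show ((K:Int)+2) = ((K+1:Nat):Int)+1 by push_cast; ring,
          factfold_list p (K+1), factfold_scalar p K]
      -- lengths
      simp only [PySem.List.len_eq, PySem.List.length_pySetD, List.length_replicate,
        List.length_map, List.length_range]
      -- the seed of the inverse-factorial fill
      have hsplit : (List.range (K+2)).map (factm p)
          = (List.range (K+1)).map (factm p) ++ [factm p (K+1)] := by
        rw [List.range_succ, List.map_append]; rfl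
      rw [hsplit, PySem.List.pyGetD_neg_one_append_singleton, ← hsplit]
      rw [show PySem.Int.mod (factm p K * ((K:Int)+1)) p = factm p (K+1) from rfl]
      -- replicated lists as maps over range
      rw [replicate_eq_mapRange (K+2) 1, replicate_eq_mapRange (K+1) 0]
      -- both initial inverse-factorial lists are the same set-at-the-top list
      rw [pySetD_neg_one' ((List.range (K+2)).map (fun _ => (1:Int)))
            (pyPowMod p (factm p (K+1)) (p-2).toNat) (by simp)]
      simp only [List.length_map, List.length_range]
      rw [show K+2-1 = K+1 by omega]
      rw [PySem.List.pySetD_of_nonneg _ _ (show (0:Int) ≤ (K:Int)+1 by omega)]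
      rw [show ((K:Int)+1).toNat = K+1 by omega]
      rw [mapRange_set (K+2) (K+1) _ _ (by omega)]
      -- bring them into the fill lemma's shape and run the fill
      have hinit : (List.range (K+2)).map (fun j => if j = K+1
            then pyPowMod p (factm p (K+1)) (p-2).toNat else 1)
          = (List.range (K+2)).map (fun k => if K+1 ≤ k
            then finvg p (pyPowMod p (factm p (K+1)) (p-2).toNat) (K+1) (K+1-k) else 1) := by
        apply List.map_congr_left
        intro j hj
        simp only [List.mem_range] at hj
        by_cases h : j = K+1
        · subst h; rw [if_pos rfl, if_pos le_rfl, Nat.sub_self]; rfl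
        · rw [if_neg h, if_neg (by omega)]
      rw [hinit]
      have hfillA := finvfill p (pyPowMod p (factm p (K+1)) (p-2).toNat) (K+1) (K+1) le_rfl
      rw [show K+1+1 = K+2 by omega] at hfillA
      have hfillB := hfillA
      rw [show ((K+1:Nat):Int) = ((K+2:Nat):Int) - 1 by push_cast; ring] at hfillA
      rw [show ((K+1:Nat):Int) = (K:Int) + 1 by push_cast; ring] at hfillB
      rw [hfillA, hfillB]
      -- name the common data
      set S : Int := pyPowMod p (factm p (K+1)) (p-2).toNat with hS
      set FI : List Int := (List.range (K+2)).map (fun k => finvg p S (K+1) (K+1-k)) with hFIdef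
      have hgetFI : ∀ k, k ≤ K + 1 →
          PySem.List.pyGetD FI (k : Int) 0 = finvg p S (K+1) (K+1-k) := by
        intro k hk
        rw [hFIdef, PySem.List.pyGetD_natCast, PySem.List.getD_map_range _ _ _ _ (by omega)]
      -- A's Bernoulli table
      rw [PySem.List.pySetD_of_nonneg _ _ (le_refl (0:Int))]
      simp only [Int.toNat_zero]
      rw [mapRange_set (K+1) 0 _ _ (by omega)]
      have hbern0 : (List.range (K+1)).map (fun j => if j = 0 then (1:Int) else 0)
          = (List.range (K+1)).map
              (fun k => if k ≤ 0 then br p (fun k => finvg p S (K+1) (K+1-k)) k else 0) := by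
        apply List.map_congr_left; intro j hj
        by_cases h : j = 0
        · subst h; rw [if_pos rfl, if_pos le_rfl]; rfl
        · rw [if_neg h, if_neg (by omega)]
      rw [hbern0, bernAfold p FI (fun k => finvg p S (K+1) (K+1-k)) K hgetFI K le_rfl]
      -- B's Bernoulli table
      have hbernB := bernBfold p FI (fun k => finvg p S (K+1) (K+1-k)) K hp0 hgetFI (K+1) le_rfl
      rw [show ((K+1:Nat):Int) = (K:Int)+1 by push_cast; ring] at hbernB
      rw [hbernB]
      simp only []
      -- the sign flip at index 1, on both tables
      have hreadA : PySem.List.pyGetD ((List.range (K+1)).map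
            (fun k => if k ≤ K then br p (fun k => finvg p S (K+1) (K+1-k)) k else 0)) 1 0
          = br p (fun k => finvg p S (K+1) (K+1-k)) 1 := by
        rw [show (1:Int) = ((1:Nat):Int) by norm_num, PySem.List.pyGetD_natCast,
            PySem.List.getD_map_range _ _ _ _ (by omega), if_pos (by omega)]
      have hreadB : PySem.List.pyGetD ((List.range (K+1)).map
            (fun k => if k < K + 1 then br p (fun k => finvg p S (K+1) (K+1-k)) k else 0)) 1 0
          = br p (fun k => finvg p S (K+1) (K+1-k)) 1 := by
        rw [show (1:Int) = ((1:Nat):Int) by norm_num, PySem.List.pyGetD_natCast,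
            PySem.List.getD_map_range _ _ _ _ (by omega), if_pos (by omega)]
      rw [hreadA, hreadB]
      rw [PySem.List.pySetD_of_nonneg _ _ (show (0:Int) ≤ 1 by norm_num)]
      rw [PySem.List.pySetD_of_nonneg _ _ (show (0:Int) ≤ 1 by norm_num)]
      simp only [Int.toNat_one]
      rw [mapRange_set (K+1) 1 (fun k => if k ≤ K
            then br p (fun k => finvg p S (K+1) (K+1-k)) k else 0) _ (by omega)]
      rw [mapRange_set (K+1) 1 (fun k => if k < K + 1
            then br p (fun k => finvg p S (K+1) (K+1-k)) k else 0) _ (by omega)]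
      have hflipA : (List.range (K+1)).map (fun j => if j = 1
            then p - br p (fun k => finvg p S (K+1) (K+1-k)) 1
            else if j ≤ K then br p (fun k => finvg p S (K+1) (K+1-k)) j else 0)
          = (List.range (K+1)).map (fun j => if j = 1
            then p - br p (fun k => finvg p S (K+1) (K+1-k)) 1
            else br p (fun k => finvg p S (K+1) (K+1-k)) j) := by
        apply List.map_congr_left; intro j hj
        simp only [List.mem_range] at hj
        by_cases h : j = 1
        · rw [if_pos h, if_pos h]
        · rw [if_neg h, if_neg h, if_pos (by omega)]
      have hflipB : (List.range (K+1)).map (fun j => if j = 1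
            then p - br p (fun k => finvg p S (K+1) (K+1-k)) 1
            else if j < K + 1 then br p (fun k => finvg p S (K+1) (K+1-k)) j else 0)
          = (List.range (K+1)).map (fun j => if j = 1
            then p - br p (fun k => finvg p S (K+1) (K+1-k)) 1
            else br p (fun k => finvg p S (K+1) (K+1-k)) j) := by
        apply List.map_congr_left; intro j hj
        simp only [List.mem_range] at hj
        by_cases h : j = 1
        · rw [if_pos h, if_pos h]
        · rw [if_neg h, if_neg h, if_pos (by omega)]
      rw [hflipA, hflipB]
      set BW : List Int := (List.range (K+1)).map (fun j => if j = 1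
            then p - br p (fun k => finvg p S (K+1) (K+1-k)) 1
            else br p (fun k => finvg p S (K+1) (K+1-k)) j) with hBWdef
      -- the two evaluation loops
      rw [show pyPowMod p n (K+1)
          = npw p n (pyPowMod p n ((p-2).toNat)) K 0 from rfl]
      have hloopA := loopAfold p n (pyPowMod p n ((p-2).toNat)) BW FI K (K+1)
      rw [show ((K+1:Nat):Int) = (K:Int)+1 by push_cast; ring] at hloopA
      rw [hloopA]
      have hloopB := loopBfold p n BW FI K (K+1)
      rw [show ((K+1:Nat):Int) = (K:Int)+1 by push_cast; ring] at hloopB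
      rw [hloopB]
      simp only []
      have hlast : PySem.List.pyGetD ((List.range (K+2)).map (factm p)) ((K:Nat):Int) 0
          = factm p K := by
        rw [PySem.List.pyGetD_natCast, PySem.List.getD_map_range _ _ _ _ (by omega)]
      rw [hlast]
      apply modCongr _ _ _ hp0
      rw [Int.cast_mul, Int.cast_mul]
      have hsum : ((((List.range (K+1)).map (fun (i : Nat) =>
            PySem.List.pyGetD BW (i:Int) 0 * npw p n (pyPowMod p n ((p - 2).toNat)) K i *
            PySem.List.pyGetD FI ((K:Int) + 1 - (i:Int)) 0)).sum : Int) : ZMod p.toNat)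
          = ((rh p n (fun (i : Nat) => PySem.List.pyGetD BW (i:Int) 0
              * PySem.List.pyGetD FI ((K:Int) + 1 - (i:Int)) 0) (K+1) : Int) : ZMod p.toNat) := by
        rw [rh_cast _ _ _ hp0]
        rw [show ((List.range (K+1)).map (fun (i : Nat) =>
            PySem.List.pyGetD BW (i:Int) 0 * npw p n (pyPowMod p n ((p - 2).toNat)) K i *
            PySem.List.pyGetD FI ((K:Int) + 1 - (i:Int)) 0)).sum
          = ∑ i ∈ Finset.range (K+1), (PySem.List.pyGetD BW (i:Int) 0
              * npw p n (pyPowMod p n ((p - 2).toNat)) K i *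
              PySem.List.pyGetD FI ((K:Int) + 1 - (i:Int)) 0) from rfl]
        push_cast
        apply Finset.sum_congr rfl
        intro i hi
        simp only [Finset.mem_range] at hi
        rw [npw_cast _ _ _ _ hp0, castPowMod _ _ _ hp0,
            show (p-2).toNat = p.toNat - 2 by omega,
            fermat_term p.toNat hpre _ K i (by omega) hPK]
        ring
      rw [hsum]
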